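-- pv_equiv track=rewrite | github.com/lifestylevegas/codewars | Spin Around, Touch the Ground.py | spin_around
-- ===== SOURCE A (Python) =====
-- def spin_around(lst: list):
--     spin=0
--     for item in lst:
--         if item=='right':
--             spin+=90
--         elif item=='left':
--             spin-=90
--     return abs(spin)//360
-- ===== SOURCE B (Python) =====
-- def spin_around(lst: list):
--     return abs(lst.count('right') - lst.count('left')) // 4
-- ===== Notes on version B (the rewrite author's own statement) =====
-- stated objective: simpler
-- what changed: Replaces the signed running-degree accumulator and final //360 by two occurrence counts and the closed form abs(r-l)//4.
import Mathlib
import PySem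

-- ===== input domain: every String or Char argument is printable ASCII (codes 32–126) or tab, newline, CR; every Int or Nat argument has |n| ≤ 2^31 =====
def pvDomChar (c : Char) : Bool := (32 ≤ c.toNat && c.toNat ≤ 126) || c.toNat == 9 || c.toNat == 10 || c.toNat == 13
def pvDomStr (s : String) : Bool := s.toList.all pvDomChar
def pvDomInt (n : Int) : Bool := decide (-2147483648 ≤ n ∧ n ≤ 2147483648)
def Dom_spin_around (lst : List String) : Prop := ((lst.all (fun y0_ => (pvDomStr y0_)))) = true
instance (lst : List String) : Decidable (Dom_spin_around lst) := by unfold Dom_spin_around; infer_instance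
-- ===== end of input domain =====

-- B replaces A's signed running accumulator and final //360 by two occurrence counts and the closed form abs(r-l)//4 (simpler).

-- ===== PORT A =====
def spin_around (lst : List String) : Int :=
  let spin := lst.foldl (fun spin item =>
    if item = "right" then spin + 90
    else if item = "left" then spin - 90
    else spin) (0 : Int)
  PySem.Int.floordiv |spin| 360

-- ===== PORT B =====
def spin_around_alt (lst : List String) : Int :=
  PySem.Int.floordiv |((PySem.List.count lst "right" : Int) - (PySem.List.count lst "left" : Int))| 4

-- ===== PRECONDITION & SPEC =====
def Spec_spin_around (lst : List String) (out : Int) : Prop := out = spin_around_alt lst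
instance (lst : List String) (out : Int) : Decidable (Spec_spin_around lst out) := by unfold Spec_spin_around; infer_instance

-- ===== CLAIM (what is proved, stated in full; the proofs are below) =====
def Claim_equal_spin_around : Prop := ∀ (lst : List String), Dom_spin_around lst → Spec_spin_around lst (spin_around lst)

-- ===== LEMMAS AND PROOFS =====

theorem spin_foldl_eq (lst : List String) (s : Int) :
    lst.foldl (fun spin item =>
      if item = "right" then spin + 90
      else if item = "left" then spin - 90
      else spin) s
    = s + 90 * ((PySem.List.count lst "right" : Int) - (PySem.List.count lst "left" : Int)) := by
  induction lst generalizing s with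
  | nil => simp [PySem.List.count]
  | cons x xs ih =>
    simp only [List.foldl_cons, ih, PySem.List.count_eq, List.count_cons]
    by_cases hr : x = "right" <;> by_cases hl : x = "left" <;>
      simp [hr, hl, PySem.List.count_eq] at * <;> push_cast <;> ring

theorem floordiv_abs90 (d : Int) :
    PySem.Int.floordiv |90 * d| 360 = PySem.Int.floordiv |d| 4 := by
  rw [PySem.Int.floordiv_eq_ediv_of_pos (by norm_num),
      PySem.Int.floordiv_eq_ediv_of_pos (by norm_num)]
  have : |(90 : Int) * d| = 90 * |d| := by
    rw [abs_mul]; norm_num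
  rw [this, show (360 : Int) = 90 * 4 by norm_num,
      Int.mul_ediv_mul_of_pos _ _ (by norm_num : (0:Int) < 90)]

-- ===== VERDICT (by name: the statement is the Claim_ definition above) =====
theorem spin_around_spec : Claim_equal_spin_around := by
  intro lst _
  unfold Spec_spin_around spin_around spin_around_alt
  rw [spin_foldl_eq, zero_add, floordiv_abs90]
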